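-- pv_equiv track=rewrite | github.com/jdhalimi/aoc-2023 | day_03.py | calc_gear_power
-- ===== SOURCE A (Python) =====
-- def mult(iterable):
--     res = 1
--     for x in iterable:
--         res *= x
--     return res
--
-- def adjacent_symbols(x, y, symbols):
--     for sx, sy in symbols:
--         if abs(x - sx) <= 1 and abs(y - sy) <= 1:
--             return True
--     return False
--
-- def calc_adjacent_numbers(grid, symbols):
--     numbers = []
--     for y, row in enumerate(grid):
--         n = 0
--         test_adjacent = False
--         for x, cell in enumerate(row.strip() + '.'):
--             if cell.isdigit():
--                 if adjacent_symbols(x, y, symbols):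
--                     test_adjacent = True
--                 n = n * 10 + int(cell)
--                 continue
--             if test_adjacent:
--                 numbers.append(n)
--             n = 0
--             test_adjacent = False
--
--     return numbers
--
-- def find_gears(grid):
--     symbols = []
--     for y, row in enumerate(grid):
--         for x, cell in enumerate(row.strip()):
--             if cell == '*':
--                 symbols.append((x, y))
--     return symbols
--
-- def calc_gear_power(grid):
--     gears = find_gears(grid)
--     power = 0
--     for gear in gears:
--         numbers = calc_adjacent_numbers(grid, [gear])
--         if len(numbers) > 1:
--             power += mult(numbers)
--     return power
-- ===== SOURCE B (Python) =====
-- def calc_gear_power(grid):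
--     # Parse all numbers once with their row and column span, then score each
--     # gear against the parsed list instead of rescanning the whole grid per gear.
--     numbers = []  # (value, row, first column, last column)
--     for y, row in enumerate(grid):
--         row = row.strip()
--         start = None
--         n = 0
--         for x, c in enumerate(row):
--             if c.isdigit():
--                 if start is None:
--                     start = x
--                 n = n * 10 + int(c)
--             else:
--                 if start is not None:
--                     numbers.append((n, y, start, x - 1))
--                     start = None
--                     n = 0
--         if start is not None:
--             numbers.append((n, y, start, len(row) - 1))
--     total = 0
--     for y, row in enumerate(grid):
--         row = row.strip()
--         for x, c in enumerate(row):
--             if c == '*':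
--                 adj = [v for v, ny, s, e in numbers
--                        if abs(ny - y) <= 1 and s - 1 <= x <= e + 1]
--                 if len(adj) > 1:
--                     p = 1
--                     for v in adj:
--                         p *= v
--                     total += p
--     return total
-- ===== Notes on version B (the rewrite author's own statement) =====
-- stated objective: alternative
-- what changed: B parses every number once into (value, row, column-span) records and scores each gear by filtering that list, instead of A's per-gear full-grid rescan with a digit-by-digit adjacency flag; it trades A's rescans for an upfront parse, with the same measured cost on the generated inputs.
import Mathlib
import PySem

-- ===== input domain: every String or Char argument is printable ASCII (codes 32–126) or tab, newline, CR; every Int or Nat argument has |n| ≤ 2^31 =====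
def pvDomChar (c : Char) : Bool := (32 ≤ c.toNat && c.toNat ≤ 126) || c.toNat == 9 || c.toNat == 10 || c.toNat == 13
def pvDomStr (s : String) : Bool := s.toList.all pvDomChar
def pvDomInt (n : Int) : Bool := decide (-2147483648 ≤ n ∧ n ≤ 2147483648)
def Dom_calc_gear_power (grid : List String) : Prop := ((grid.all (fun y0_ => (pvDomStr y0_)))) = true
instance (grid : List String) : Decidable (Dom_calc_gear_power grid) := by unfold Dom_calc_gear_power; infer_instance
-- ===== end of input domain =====

-- B parses all numbers once with their positions and scores each gear against that list,
-- instead of A's per-gear rescan of the whole grid. Objective: alternative algorithm.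

-- ===== PORT A =====

-- mult(iterable)
def pvMult (l : List Int) : Int := l.foldl (fun r x => r * x) 1

-- adjacent_symbols(x, y, symbols); the early 'return True' is List.any
def pvAdjacentSymbols (x y : Int) (symbols : List (Int × Int)) : Bool :=
  symbols.any (fun s => decide (|x - s.1| ≤ 1) && decide (|y - s.2| ≤ 1))

-- one step of the inner loop of calc_adjacent_numbers; state = (numbers, n, test_adjacent)
def pvStepA (symbols : List (Int × Int)) (y : Int)
    (st : List Int × Int × Bool) (p : Int × Char) : List Int × Int × Bool :=
  if PySem.Chars.isdigit p.2 then
    (st.1, st.2.1 * 10 + (PySem.Int.ofChars? [p.2]).getD 0,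
     st.2.2 || pvAdjacentSymbols p.1 y symbols)
  else if st.2.2 then (st.1 ++ [st.2.1], 0, false) else (st.1, 0, false)

-- calc_adjacent_numbers(grid, symbols); row.strip() ported via Chars.strip on toList
def pvCalcAdjacentNumbers (grid : List String) (symbols : List (Int × Int)) : List Int :=
  (PySem.List.enumerate grid 0).foldl (fun numbers yr =>
    ((PySem.List.enumerate (PySem.Chars.strip yr.2.toList ++ ['.']) 0).foldl
      (pvStepA symbols yr.1) (numbers, 0, false)).1) []

-- find_gears(grid)
def pvFindGears (grid : List String) : List (Int × Int) :=
  (PySem.List.enumerate grid 0).foldl (fun syms yr =>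
    (PySem.List.enumerate (PySem.Chars.strip yr.2.toList) 0).foldl
      (fun syms p => if p.2 == '*' then syms ++ [(p.1, yr.1)] else syms) syms) []

def calc_gear_power (grid : List String) : Int :=
  (pvFindGears grid).foldl (fun power gear =>
    let numbers := pvCalcAdjacentNumbers grid [gear]
    if numbers.length > 1 then power + pvMult numbers else power) 0

-- ===== PORT B =====

-- one step of B's parsing loop; state = (numbers, start, n); numbers entries are (value, row, first col, last col)
def pvStepB (y : Int) (st : List (Int × Int × Int × Int) × Option Int × Int)
    (p : Int × Char) : List (Int × Int × Int × Int) × Option Int × Int :=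
  if PySem.Chars.isdigit p.2 then
    (st.1, some (st.2.1.getD p.1), st.2.2 * 10 + (PySem.Int.ofChars? [p.2]).getD 0)
  else
    match st.2.1 with
    | some s => (st.1 ++ [(st.2.2, y, s, p.1 - 1)], none, 0)
    | none => st

-- B's first pass: parse every number with its position
def pvParseNumbers (grid : List String) : List (Int × Int × Int × Int) :=
  (PySem.List.enumerate grid 0).foldl (fun numbers yr =>
    let row := PySem.Chars.strip yr.2.toList
    let st := (PySem.List.enumerate row 0).foldl (pvStepB yr.1) (numbers, none, 0)
    match st.2.1 with
    | some s => st.1 ++ [(st.2.2, yr.1, s, (row.length : Int) - 1)]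
    | none => st.1) []

-- B's adjacency test of a parsed number q against gear position (x, y)
def pvAdjNum (x y : Int) (q : Int × Int × Int × Int) : Bool :=
  decide (|q.2.1 - y| ≤ 1) && decide (q.2.2.1 - 1 ≤ x) && decide (x ≤ q.2.2.2 + 1)

-- B's second pass: for each '*' score it against the parsed numbers
def calc_gear_power_alt (grid : List String) : Int :=
  let numbers := pvParseNumbers grid
  (PySem.List.enumerate grid 0).foldl (fun total yr =>
    (PySem.List.enumerate (PySem.Chars.strip yr.2.toList) 0).foldl (fun total p =>
      if p.2 == '*' then
        let adj := (numbers.filter (pvAdjNum p.1 yr.1)).map (fun q => q.1)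
        if adj.length > 1 then total + adj.foldl (fun r v => r * v) 1 else total
      else total) total) 0

-- ===== PRECONDITION & SPEC =====
def Spec_calc_gear_power (grid : List String) (out : Int) : Prop := out = calc_gear_power_alt grid
instance (grid : List String) (out : Int) : Decidable (Spec_calc_gear_power grid out) := by unfold Spec_calc_gear_power; infer_instance

-- ===== CLAIM (what is proved, stated in full; the proofs are below) =====
def Claim_equal_calc_gear_power : Prop := ∀ (grid : List String), Dom_calc_gear_power grid → Spec_calc_gear_power grid (calc_gear_power grid)

-- ===== LEMMAS AND PROOFS =====

-- filtered view of B's number list for a gear g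
def pvF (g : Int × Int) (l : List (Int × Int × Int × Int)) : List Int :=
  (l.filter (pvAdjNum g.1 g.2)).map (fun q => q.1)

-- A's inner row scan (chars cs starting at column k), result = numbers list
def pvRunA (g : Int × Int) (y : Int) (cs : List Char) (k : Int)
    (acc : List Int) (n : Int) (flag : Bool) : List Int :=
  ((PySem.List.enumerate (cs ++ ['.']) k).foldl (pvStepA [g] y) (acc, n, flag)).1

-- B's row parse (chars cs starting at column k) with the final flush
def pvRunB (y : Int) (cs : List Char) (k : Int)
    (acc : List (Int × Int × Int × Int)) (st? : Option Int) (n : Int) :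
    List (Int × Int × Int × Int) :=
  match (PySem.List.enumerate cs k).foldl (pvStepB y) (acc, st?, n) with
  | (nums, some s, m) => nums ++ [(m, y, s, k + (cs.length : Int) - 1)]
  | (nums, none, _) => nums

theorem pvF_append (g : Int × Int) (l l' : List (Int × Int × Int × Int)) :
    pvF g (l ++ l') = pvF g l ++ pvF g l' := by
  simp [pvF]

-- A's digit-adjacency test against the single symbol g, as an interval condition
theorem pv_adj_one (g : Int × Int) (y k : Int) :
    pvAdjacentSymbols k y [g]
      = (decide (|y - g.2| ≤ 1) && decide (k - 1 ≤ g.1) && decide (g.1 ≤ k + 1)) := by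
  simp only [pvAdjacentSymbols, List.any_cons, List.any_nil, Bool.or_false,
    ← Bool.decide_and, decide_eq_decide, abs_le]
  omega

-- extending the flag over one more digit keeps the interval form
theorem pv_flag_step (g : Int × Int) (y s k : Int) (hsk : s < k) :
    ((decide (|y - g.2| ≤ 1) && decide (s - 1 ≤ g.1) && decide (g.1 ≤ k))
        || pvAdjacentSymbols k y [g])
      = (decide (|y - g.2| ≤ 1) && decide (s - 1 ≤ g.1) && decide (g.1 ≤ k + 1)) := by
  simp only [pvAdjacentSymbols, List.any_cons, List.any_nil, Bool.or_false,
    ← Bool.decide_and, ← Bool.decide_or, decide_eq_decide, abs_le]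
  omega

-- the flag equals B's adjacency test of the flushed number
theorem pv_flag_flush (g : Int × Int) (y s k n : Int) :
    pvAdjNum g.1 g.2 (n, y, s, k - 1)
      = (decide (|y - g.2| ≤ 1) && decide (s - 1 ≤ g.1) && decide (g.1 ≤ k)) := by
  simp only [pvAdjNum, ← Bool.decide_and, decide_eq_decide, abs_le]
  omega

-- flushing a number started at s with the scan at column k, on the filtered side
theorem pv_flush_eq (g : Int × Int) (y s k n : Int)
    (acc : List (Int × Int × Int × Int)) :
    pvF g (acc ++ [(n, y, s, k - 1)])
      = (if (decide (|y - g.2| ≤ 1) && decide (s - 1 ≤ g.1) && decide (g.1 ≤ k)) = true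
         then pvF g acc ++ [n] else pvF g acc) := by
  rw [pvF_append]
  simp only [pvF, List.filter_cons, List.filter_nil, pv_flag_flush]
  cases hb : (decide (|y - g.2| ≤ 1) && decide (s - 1 ≤ g.1) && decide (g.1 ≤ k)) <;>
    simp

theorem pvRunB_cons (y : Int) (c : Char) (cs : List Char) (k : Int)
    (acc : List (Int × Int × Int × Int)) (st? : Option Int) (n : Int) :
    pvRunB y (c :: cs) k acc st? n
      = pvRunB y cs (k + 1) (pvStepB y (acc, st?, n) (k, c)).1
          (pvStepB y (acc, st?, n) (k, c)).2.1 (pvStepB y (acc, st?, n) (k, c)).2.2 := by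
  have hidx : k + ((c :: cs).length : Int) - 1 = (k + 1) + (cs.length : Int) - 1 := by
    push_cast [List.length_cons]; ring
  simp only [pvRunB, PySem.List.enumerate_cons, List.foldl_cons, hidx]

theorem pvRunA_cons (g : Int × Int) (y : Int) (c : Char) (cs : List Char) (k : Int)
    (acc : List Int) (n : Int) (flag : Bool) :
    pvRunA g y (c :: cs) k acc n flag
      = pvRunA g y cs (k + 1) (pvStepA [g] y (acc, n, flag) (k, c)).1
          (pvStepA [g] y (acc, n, flag) (k, c)).2.1 (pvStepA [g] y (acc, n, flag) (k, c)).2.2 := by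
  simp only [pvRunA, List.cons_append, PySem.List.enumerate_cons, List.foldl_cons]

-- the core row-scan equivalence: A's flagged scan = B's parse, filtered for gear g
theorem pv_scan (g : Int × Int) (y : Int) :
    ∀ (cs : List Char) (k : Int) (acc : List (Int × Int × Int × Int))
      (st? : Option Int) (n : Int) (flag : Bool),
      ((st? = none ∧ n = 0 ∧ flag = false) ∨
       (∃ s : Int, st? = some s ∧ s < k ∧
         flag = (decide (|y - g.2| ≤ 1) && decide (s - 1 ≤ g.1) && decide (g.1 ≤ k)))) →
      pvRunA g y cs k (pvF g acc) n flag = pvF g (pvRunB y cs k acc st? n)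
  | [], k, acc, st?, n, flag, h => by
    rcases h with ⟨h1, h2, h3⟩ | ⟨s, hs, hsk, hf⟩
    · subst h1; subst h2; subst h3
      simp [pvRunA, pvRunB, pvStepA, PySem.List.enumerate_cons, PySem.Chars.isdigit]
    · subst hs; subst hf
      have hA : pvRunA g y [] k (pvF g acc) n
          (decide (|y - g.2| ≤ 1) && decide (s - 1 ≤ g.1) && decide (g.1 ≤ k))
          = (if (decide (|y - g.2| ≤ 1) && decide (s - 1 ≤ g.1) && decide (g.1 ≤ k)) = true
             then pvF g acc ++ [n] else pvF g acc) := by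
        simp [pvRunA, pvStepA, PySem.List.enumerate_cons, PySem.Chars.isdigit]
        split <;> rfl
      have hB : pvRunB y [] k acc (some s) n = acc ++ [(n, y, s, k - 1)] := by
        simp [pvRunB, PySem.List.enumerate_nil]
      rw [hA, hB, pv_flush_eq]
  | c :: cs, k, acc, st?, n, flag, h => by
    rw [pvRunA_cons, pvRunB_cons]
    by_cases hd : PySem.Chars.isdigit c = true
    · rcases h with ⟨h1, h2, h3⟩ | ⟨s, hs, hsk, hf⟩
      · subst h1; subst h2; subst h3
        have hA : pvStepA [g] y (pvF g acc, 0, false) (k, c)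
            = (pvF g acc, 0 * 10 + (PySem.Int.ofChars? [c]).getD 0,
               pvAdjacentSymbols k y [g]) := by
          simp [pvStepA, hd]
        have hB : pvStepB y (acc, none, 0) (k, c)
            = (acc, some k, 0 * 10 + (PySem.Int.ofChars? [c]).getD 0) := by
          simp [pvStepB, hd]
        rw [hA, hB]
        simp only [pv_adj_one]
        exact pv_scan g y cs (k + 1) acc (some k) _ _
          (Or.inr ⟨k, rfl, by omega, rfl⟩)
      · subst hs; subst hf
        have hA : pvStepA [g] y (pvF g acc, n,
              (decide (|y - g.2| ≤ 1) && decide (s - 1 ≤ g.1) && decide (g.1 ≤ k))) (k, c)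
            = (pvF g acc, n * 10 + (PySem.Int.ofChars? [c]).getD 0,
               ((decide (|y - g.2| ≤ 1) && decide (s - 1 ≤ g.1) && decide (g.1 ≤ k))
                 || pvAdjacentSymbols k y [g])) := by
          simp [pvStepA, hd]
        have hB : pvStepB y (acc, some s, n) (k, c)
            = (acc, some s, n * 10 + (PySem.Int.ofChars? [c]).getD 0) := by
          simp [pvStepB, hd]
        rw [hA, hB, pv_flag_step g y s k hsk]
        exact pv_scan g y cs (k + 1) acc (some s) _ _
          (Or.inr ⟨s, rfl, by omega, rfl⟩)
    · rcases h with ⟨h1, h2, h3⟩ | ⟨s, hs, hsk, hf⟩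
      · subst h1; subst h2; subst h3
        have hA : pvStepA [g] y (pvF g acc, 0, false) (k, c) = (pvF g acc, 0, false) := by
          simp [pvStepA, hd]
        have hB : pvStepB y (acc, none, 0) (k, c) = (acc, none, 0) := by
          simp [pvStepB, hd]
        rw [hA, hB]
        exact pv_scan g y cs (k + 1) acc none 0 false (Or.inl ⟨rfl, rfl, rfl⟩)
      · subst hs; subst hf
        have hA : pvStepA [g] y (pvF g acc, n,
              (decide (|y - g.2| ≤ 1) && decide (s - 1 ≤ g.1) && decide (g.1 ≤ k))) (k, c)
            = (pvF g (acc ++ [(n, y, s, k - 1)]), 0, false) := by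
          rw [pv_flush_eq]
          simp [pvStepA, hd]
          split <;> rfl
        have hB : pvStepB y (acc, some s, n) (k, c)
            = (acc ++ [(n, y, s, k - 1)], none, 0) := by
          simp [pvStepB, hd]
        rw [hA, hB]
        exact pv_scan g y cs (k + 1) (acc ++ [(n, y, s, k - 1)]) none 0 false
          (Or.inl ⟨rfl, rfl, rfl⟩)

-- row-by-row accumulation: A's numbers list stays the filtered view of B's
theorem pv_rows (g : Int × Int) :
    ∀ (rows : List String) (y : Int) (accA : List Int)
      (accB : List (Int × Int × Int × Int)), accA = pvF g accB →
      (PySem.List.enumerate rows y).foldl (fun numbers yr =>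
          pvRunA g yr.1 (PySem.Chars.strip yr.2.toList) 0 numbers 0 false) accA
        = pvF g ((PySem.List.enumerate rows y).foldl (fun nums yr =>
            pvRunB yr.1 (PySem.Chars.strip yr.2.toList) 0 nums none 0) accB)
  | [], y, accA, accB, hrel => by
    simpa [PySem.List.enumerate_nil] using hrel
  | r :: rows, y, accA, accB, hrel => by
    simp only [PySem.List.enumerate_cons, List.foldl_cons]
    apply pv_rows g rows (y + 1)
    rw [hrel]
    exact pv_scan g y (PySem.Chars.strip r.toList) 0 accB none 0 false
      (Or.inl ⟨rfl, rfl, rfl⟩)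

theorem pv_parse_eq (grid : List String) :
    pvParseNumbers grid
      = (PySem.List.enumerate grid 0).foldl (fun nums yr =>
          pvRunB yr.1 (PySem.Chars.strip yr.2.toList) 0 nums none 0) [] := by
  unfold pvParseNumbers
  apply PySem.List.foldl_congr_mem
  intro nums yr _
  rcases hst : (PySem.List.enumerate (PySem.Chars.strip yr.2.toList) 0).foldl (pvStepB yr.1) (nums, none, 0)
    with ⟨ns, st?, m⟩
  simp only [pvRunB, hst]
  cases st? <;> simp

-- A's adjacent-number list for one gear is the filtered view of B's parse
theorem pv_numbers (grid : List String) (g : Int × Int) :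
    pvCalcAdjacentNumbers grid [g] = pvF g (pvParseNumbers grid) := by
  rw [pv_parse_eq]
  exact pv_rows g grid 0 [] [] (by simp [pvF])

-- a fold over guarded elements is a fold over the filtered, mapped list
theorem pv_foldl_guard {α β γ : Type} (p : α → Bool) (h : α → β) (f : γ → β → γ) :
    ∀ (l : List α) (a : γ),
      l.foldl (fun a x => if p x then f a (h x) else a) a = ((l.filter p).map h).foldl f a
  | [], a => rfl
  | x :: l, a => by
    by_cases hp : p x = true <;>
      simp [hp, pv_foldl_guard p h f l]

-- folding over a flatMap is the nested fold
theorem pv_foldl_flatMap {α β γ : Type} (h : α → List β) (f : γ → β → γ) :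
    ∀ (l : List α) (a : γ),
      (l.flatMap h).foldl f a = l.foldl (fun a x => (h x).foldl f a) a
  | [], a => rfl
  | x :: l, a => by
    simp [List.flatMap_cons, List.foldl_append, pv_foldl_flatMap h f l]

-- the gears of one row, as a filtered enumerate
def pvRowG (yr : Int × String) : List (Int × Int) :=
  ((PySem.List.enumerate (PySem.Chars.strip yr.2.toList) 0).filter (fun p => p.2 == '*')).map
    (fun p => (p.1, yr.1))

theorem pv_gears_eq (grid : List String) :
    pvFindGears grid = (PySem.List.enumerate grid 0).flatMap pvRowG := by
  unfold pvFindGears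
  rw [show ((fun (syms : List (Int × Int)) (yr : Int × String) =>
      (PySem.List.enumerate (PySem.Chars.strip yr.2.toList) 0).foldl
        (fun syms p => if p.2 == '*' then syms ++ [(p.1, yr.1)] else syms) syms))
    = (fun syms yr => syms ++ pvRowG yr) from ?_]
  · exact PySem.List.foldl_append_eq_flatMap pvRowG (PySem.List.enumerate grid 0) []
  · funext syms yr
    exact PySem.List.foldl_append_if _ _ _ _

theorem pv_main (grid : List String) : calc_gear_power grid = calc_gear_power_alt grid := by
  unfold calc_gear_power calc_gear_power_alt
  simp only [pv_numbers, pv_gears_eq, pvMult]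
  rw [pv_foldl_flatMap]
  apply PySem.List.foldl_congr_mem
  intro t yr _
  rw [pv_foldl_guard (fun p => p.2 == '*') (fun p : Int × Char => p.1)
    (fun total x =>
      if (((pvParseNumbers grid).filter (pvAdjNum x yr.1)).map fun q => q.1).length > 1
      then total + (((pvParseNumbers grid).filter (pvAdjNum x yr.1)).map fun q => q.1).foldl
        (fun r v => r * v) 1
      else total)]
  unfold pvRowG
  rw [List.foldl_map, List.foldl_map]
  apply PySem.List.foldl_congr_mem
  intro a x _
  simp [pvF]

-- ===== VERDICT (by name: the statement is the Claim_ definition above) =====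
theorem calc_gear_power_spec : Claim_equal_calc_gear_power := by
  intro grid _
  exact pv_main grid
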